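-- pv_equiv track=rewrite | github.com/CUE100/legal_discovery_app | app.py | format_diarized_transcript
-- ===== SOURCE A (Python) =====
-- def format_diarized_transcript(words):
--     """Reconstructs transcript with speaker labels from word-level data."""
--     if not words:
--         return ""
--
--     transcript_lines = []
--     current_speaker = None
--     current_text_chunk = []
--
--     for word in words:
--         # SDK word object typically has .text and .speaker_id
--         # Fallback for dict access if it's a raw dict
--         text = getattr(word, 'text', word.get('text', ''))
--         speaker = getattr(word, 'speaker_id', word.get('speaker_id', 'Unknown'))
--
--         # Audio events might come as words or separate logic, usually embedded in text or as types
--         # Scribe v2 might put [laughter] as text.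
--
--         if speaker != current_speaker:
--             if current_speaker is not None:
--                 # Flush previous
--                 label = current_speaker.replace('_', ' ').title()
--                 content = " ".join(current_text_chunk)
--                 transcript_lines.append(f"**{label}**: {content}")
--
--             current_speaker = speaker
--             current_text_chunk = [text]
--         else:
--             current_text_chunk.append(text)
--
--     # Flush last
--     if current_speaker is not None:
--         label = current_speaker.replace('_', ' ').title()
--         content = " ".join(current_text_chunk)
--         transcript_lines.append(f"**{label}**: {content}")
--
--     return "\n\n".join(transcript_lines)
-- ===== SOURCE B (Python) =====
-- def format_diarized_transcript(words):
--     """Reconstructs transcript with speaker labels from word-level data."""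
--     if not words:
--         return ""
--     pairs = [(w.get('text', ''), w.get('speaker_id', 'Unknown')) for w in words]
--     lines = []
--     n = len(pairs)
--     i = 0
--     while i < n:
--         speaker = pairs[i][1]
--         j = i + 1
--         while j < n and pairs[j][1] == speaker:
--             j += 1
--         if speaker is not None:
--             label = speaker.replace('_', ' ').title()
--             content = " ".join(t for t, _ in pairs[i:j])
--             lines.append(f"**{label}**: {content}")
--         i = j
--     return "\n\n".join(lines)
-- ===== Notes on version B (the rewrite author's own statement) =====
-- stated objective: alternative
-- what changed: Replaces A's single stateful flush-on-speaker-change accumulator loop with a two-phase pipeline: first extract (text, speaker) pairs, then scan for maximal consecutive same-speaker runs with two indices and render each run directly.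
import Mathlib
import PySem

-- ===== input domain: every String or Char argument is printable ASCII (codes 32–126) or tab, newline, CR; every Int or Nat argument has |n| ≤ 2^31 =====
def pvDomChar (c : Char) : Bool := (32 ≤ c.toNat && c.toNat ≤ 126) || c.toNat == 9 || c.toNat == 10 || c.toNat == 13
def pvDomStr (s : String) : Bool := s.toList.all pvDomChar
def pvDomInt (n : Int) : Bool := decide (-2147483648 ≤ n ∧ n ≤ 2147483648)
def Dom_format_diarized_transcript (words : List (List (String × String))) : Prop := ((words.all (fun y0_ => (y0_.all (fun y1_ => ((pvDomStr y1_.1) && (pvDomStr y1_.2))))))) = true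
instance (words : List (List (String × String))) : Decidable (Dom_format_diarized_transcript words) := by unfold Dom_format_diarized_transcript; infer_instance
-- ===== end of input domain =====

-- B replaces A's stateful flush-on-change accumulator loop with a two-phase pipeline
-- (extract (text, speaker) pairs, then render maximal consecutive same-speaker runs); alternative decomposition, same cost.


-- Python str.title(), exact on ASCII: uppercase a letter after a non-letter, lowercase otherwise.
-- (Not in PySem; hand-ported, shared by both ports as a primitive.)
def pyTitleAux (prevAlpha : Bool) : List Char → List Char
  | [] => []
  | c :: rest =>
      (if PySem.Chars.isalpha c then
        (if prevAlpha then PySem.Chars.lowerChar c else PySem.Chars.upperChar c)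
       else c) :: pyTitleAux (PySem.Chars.isalpha c) rest

def pyTitle (s : String) : String := String.ofList (pyTitleAux false s.toList)

-- "**{label}**: {content}" for speaker s and text chunk ts
def pvLine (s : String) (ts : List String) : String :=
  "**" ++ pyTitle (PySem.Str.replace s "_" " ") ++ "**: " ++ PySem.Str.join " " ts

-- ===== PORT A =====
-- A's loop state: (transcript_lines, current_speaker, current_text_chunk); final flush after the fold.
def format_diarized_transcript (words : List (List (String × String))) : String :=
  if words = [] then "" else
  let fin := words.foldl
    (fun (st : List String × Option String × List String) word =>
      let text := (PySem.Dict.mk word).getD "text" ""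
      let speaker := (PySem.Dict.mk word).getD "speaker_id" "Unknown"
      let (lines, cur, chunk) := st
      if some speaker ≠ cur then
        match cur with
        | some cs => (lines ++ [pvLine cs chunk], some speaker, [text])
        | none => (lines, some speaker, [text])
      else (lines, cur, chunk ++ [text]))
    ([], none, [])
  let lines := match fin.2.1 with
    | some cs => fin.1 ++ [pvLine cs fin.2.2]
    | none => fin.1
  PySem.Str.join "\n\n" lines

-- ===== PORT B =====
-- B phase 1: extract (text, speaker) pairs.
def pvPairs (words : List (List (String × String))) : List (String × String) :=
  words.map (fun w => ((PySem.Dict.mk w).getD "text" "", (PySem.Dict.mk w).getD "speaker_id" "Unknown"))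

-- B phase 2: the run scan (the inner 'while j' is the maximal same-speaker prefix; i jumps to j).
-- (speakers here are always strings, so B's 'is not None' guard never fires and has no Lean counterpart)
def pvRuns : List (String × String) → List String
  | [] => []
  | (t, s) :: rest =>
      pvLine s (t :: (rest.takeWhile (fun p => p.2 == s)).map (·.1)) ::
      pvRuns (rest.dropWhile (fun p => p.2 == s))
termination_by ps => ps.length
decreasing_by
  simpa using Nat.lt_succ_of_le (List.length_dropWhile_le _ _)

def format_diarized_transcript_alt (words : List (List (String × String))) : String :=
  if words = [] then "" else
  PySem.Str.join "\n\n" (pvRuns (pvPairs words))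

-- ===== PRECONDITION & SPEC =====
def Spec_format_diarized_transcript (words : List (List (String × String))) (out : String) : Prop := out = format_diarized_transcript_alt words
instance (words : List (List (String × String))) (out : String) : Decidable (Spec_format_diarized_transcript words out) := by unfold Spec_format_diarized_transcript; infer_instance

-- ===== CLAIM (what is proved, stated in full; the proofs are below) =====
def Claim_equal_format_diarized_transcript : Prop := ∀ (words : List (List (String × String))), Dom_format_diarized_transcript words → Spec_format_diarized_transcript words (format_diarized_transcript words)

-- ===== LEMMAS AND PROOFS =====

-- A's loop restated over the extracted pairs, with the final flush folded in.
def aLoop (lines : List String) (cur : Option String) (chunk : List String) :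
    List (String × String) → List String
  | [] => match cur with
    | some cs => lines ++ [pvLine cs chunk]
    | none => lines
  | (t, s) :: rest =>
      if some s ≠ cur then
        match cur with
        | some cs => aLoop (lines ++ [pvLine cs chunk]) (some s) [t] rest
        | none => aLoop lines (some s) [t] rest
      else aLoop lines cur (chunk ++ [t]) rest

lemma aLoop_eq_foldl (ps : List (String × String)) :
    ∀ lines cur chunk,
      aLoop lines cur chunk ps =
        (let fin := ps.foldl
          (fun (st : List String × Option String × List String) (p : String × String) =>
            let (lines, cur, chunk) := st
            if some p.2 ≠ cur then
              match cur with
              | some cs => (lines ++ [pvLine cs chunk], some p.2, [p.1])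
              | none => (lines, some p.2, [p.1])
            else (lines, cur, chunk ++ [p.1]))
          (lines, cur, chunk)
        match fin.2.1 with
        | some cs => fin.1 ++ [pvLine cs fin.2.2]
        | none => fin.1) := by
  induction ps with
  | nil => intro lines cur chunk; rfl
  | cons p rest ih =>
      intro lines cur chunk
      obtain ⟨t, s⟩ := p
      simp only [aLoop, List.foldl_cons]
      by_cases h : some s = cur
      · subst h; simp [ih]
      · cases cur with
        | none => simp [h, ih]
        | some cs => simp [h, ih]

-- Core invariant: inside a run of speaker cs, aLoop extends the chunk through the run,
-- flushes one line, and continues as pvRuns on the remainder.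
lemma aLoop_some (ps : List (String × String)) :
    ∀ lines cs chunk,
      aLoop lines (some cs) chunk ps =
        lines ++ [pvLine cs (chunk ++ (ps.takeWhile (fun p => p.2 == cs)).map (·.1))]
          ++ pvRuns (ps.dropWhile (fun p => p.2 == cs)) := by
  induction ps with
  | nil => intro lines cs chunk; simp [aLoop, pvRuns]
  | cons p rest ih =>
      intro lines cs chunk
      obtain ⟨t, s⟩ := p
      by_cases h : s = cs
      · subst h
        rw [show aLoop lines (some s) chunk ((t, s) :: rest)
              = aLoop lines (some s) (chunk ++ [t]) rest by simp [aLoop]]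
        rw [ih]
        simp
      · rw [show aLoop lines (some cs) chunk ((t, s) :: rest)
              = aLoop (lines ++ [pvLine cs chunk]) (some s) [t] rest by simp [aLoop, h]]
        rw [ih]
        have hb : ((t, s).2 == cs) = false := by simp [h]
        simp [pvRuns, hb]

lemma aLoop_none (ps : List (String × String)) :
    aLoop [] none [] ps = pvRuns ps := by
  cases ps with
  | nil => simp [aLoop, pvRuns]
  | cons p rest =>
      obtain ⟨t, s⟩ := p
      simp only [aLoop, pvRuns]
      rw [aLoop_some]
      simp

-- ===== VERDICT (by name: the statement is the Claim_ definition above) =====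
theorem format_diarized_transcript_spec : Claim_equal_format_diarized_transcript := by
  intro words _
  unfold Spec_format_diarized_transcript format_diarized_transcript format_diarized_transcript_alt
  by_cases h : words = []
  · simp [h]
  · simp only [h, if_false]
    rw [← aLoop_none (pvPairs words), aLoop_eq_foldl]
    simp [pvPairs, List.foldl_map]
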